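-- pv_equiv track=rewrite | github.com/Swwynn/Acores | main.py | catch_pion
-- ===== SOURCE A (Python) =====
-- def catch_pion(grille: list, enemy: int, fromCoordinates: tuple, toCoordinates: tuple) -> int:
--     # Ici je crée une variable d'incrémentation, qui me permet de savoir dans quel direction un pion peut être manger,
--     # Diagonale, horizontal, vertical, gauche, droite etc..
--     i = 0
--     # Je récupère les x et y de la coordonnées de début et d'arrivée.
--     fromLine, fromColumn = fromCoordinates
--     toLine, toColumn = toCoordinates
--     # Et je récupère la taille max de ma grille, ça me sert pour l'encadrement de mes coups.
--     tailleMax = len(grille)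
--
--     # Enfin je récupère le pion enemie.
--     opponent = Data['player'][enemy]['pion']
--
--     # Ici, je récupère ma liste de delta, pour faire simple, dans ma DB (Base de Données, ici représenté par un
--     # dictionnaire), je crée des couples (delta) qui me permettent d'étudier chaque direction, La diagonale en bas à
--     # droite (++) la diagonale en bas à gauche (-+), la diag en haut à gauche (--) la diagonale en haut à droite( +-)
--     # et pareil pour vertical et horizontal. Ces couples me permettent, en fonction des coordonnées de départ,
--     # d'aller vérifier, si en fonction des coordonnées de départ plus le delta, si il y a une case vide ou pas,
--     # et ensuite je récupère une deuxième couple de delta, qui me permet de voir autour de mon pion initial voir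
--     # si je peux il y a quelqu'un à manger Démonstration :
--     for dx, dy in Data['deltaCatch']:
--         # Je récupère le premier couple de deltas
--         Line, Column = (fromLine + dx), (fromColumn + dy)
--         # Je crée 2 variables au quel j'additionne, la ligne et la colonne de départ, avec le delta.
--         LineInf, ColumnInf = (fromLine + Data['deltas'][i][0]), (fromColumn + Data['deltas'][i][1])
--         # Et la je fais pareil avec l'autre couple de delta (le précédent étant un delta de 2 et ici un delta de 1)
--
--         # Je fais un encadrement, pour être sur que le déplacement se situe bien dans la grille
--         if (0 <= Line < tailleMax) and (0 <= Column < tailleMax) and (0 <= LineInf < tailleMax) and (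
--                 0 <= ColumnInf < tailleMax):
--             # Je regarde avec le delta de 1, si le pion autour de moi est bien un enemy
--             if grille[LineInf][ColumnInf] == opponent:
--                 # Si c'est le cas, je regarde derrière si il y a du vide
--                 if grille[Line][Column] == " ":
--                     # Et si c'est le cas, je vérifie si ma ligne et ma colonne de départ au quel j'ai ajouté mon
--                     # delta de 2, correspondent à ma ligne et colonne d'arrive, sinon ça fait une erreur et je ne
--                     # sais toujours pas pourquoi x)
--                     if Line == toLine and Column == toColumn:
--                         # Dans ce cas là, je retourne le i associé au coups (si c'est une diagonale, vertical etc...)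
--                         return i + 1
--         i += 1
--     # Et si aucun déplacement n'est possible, je retourne -1 pour dire que rien n'est possible.
--     return -1
--
-- Data = {
--     "letter": ["A", "B", "C", "D", "E"],
--     "mini": ["a", "b", "c", "d", "e"],
--     "number": ["1", "2", "3", "4", "5"],
--     "deltas": [(+1, +1), (-1, -1), (+1, -1), (-1, +1), (-1, 0), (+1, 0), (0, +1), (0, -1)],
--     "deltaCatch": [(+2, +2), (-2, -2), (+2, -2), (-2, +2), (-2, 0), (+2, 0), (0, +2), (0, -2)],
--     "lastSelec": (None, None),
--     "lastTarget": (None, None),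
--     "iaAffichage": False,
--     "player": {
--         0: {
--             "pion": "\033[34m●\033[0m",
--             "score": 0
--         },
--         1: {
--             "pion": "\033[31m●\033[0m",
--             "score": 0
--         }
--     },
--     "message": {
--         "get": lambda
--             player: f"\n{space(15)}Joueur {player + 1} ({Data['player'][player]['pion']}), c'est a votre tour !\n{space(13)}Entez les coordonnés du pion à déplacer : ",
--         "to": lambda player: f"\n{space(14)}Entrez les coordonnés d'arrivée du pion à déplacer : ",
--         "error": lambda
--             player: f"\n{space(13)}Joueur {player + 1} ({Data['player'][player]['pion']}), coordonnés sont invalides ... \n{space(14)}Saisissez de nouvelles coordonnées : "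
--     }
-- }
-- ===== SOURCE B (Python) =====
-- # B: no direction tables at all — classify the move delta arithmetically
-- # (dx*dx+dy*dy is 4 for a straight 2-step, 8 for a diagonal 2-step), find the
-- # jumped-over square as the midpoint (from + delta//2), and compute A's
-- # direction code 1..8 by a closed arithmetic case analysis of the signs.
--
-- _PION = {0: "\033[34m\u25cf\033[0m", 1: "\033[31m\u25cf\033[0m"}
--
-- def catch_pion(grille: list, enemy: int, fromCoordinates: tuple, toCoordinates: tuple) -> int:
--     fromLine, fromColumn = fromCoordinates
--     toLine, toColumn = toCoordinates
--     opponent = _PION[enemy]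
--     dx, dy = toLine - fromLine, toColumn - fromColumn
--     if dx * dx + dy * dy not in (4, 8):
--         # not a two-square straight or diagonal move: no capture direction fits
--         return -1
--     n = len(grille)
--     midLine, midColumn = fromLine + dx // 2, fromColumn + dy // 2
--     if not (0 <= toLine < n and 0 <= toColumn < n and 0 <= midLine < n and 0 <= midColumn < n):
--         return -1
--     if grille[midLine][midColumn] != opponent or grille[toLine][toColumn] != " ":
--         return -1
--     # direction code (matches the order of A's table) from the signs of the delta
--     if dx != 0 and dy != 0:
--         return (1 if dx > 0 else 2) if dx == dy else (3 if dx > 0 else 4)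
--     if dy == 0:
--         return 5 if dx < 0 else 6
--     return 7 if dy > 0 else 8
-- ===== Notes on version B (the rewrite author's own statement) =====
-- stated objective: alternative
-- what changed: B drops A's delta tables and 8-direction scan entirely: it classifies the move delta arithmetically (dx*dx+dy*dy in {4,8} means a two-square straight/diagonal move), finds the jumped square as the midpoint from+delta//2, and computes A's direction code 1..8 by a closed sign analysis.
-- outside the precondition, e.g. on catch_pion([[' ', ' ', ' '], [' ', ' '], [' ']], 0, (0, 0), (2, 2)): A returns -1, B returns -1
import Mathlib
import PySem

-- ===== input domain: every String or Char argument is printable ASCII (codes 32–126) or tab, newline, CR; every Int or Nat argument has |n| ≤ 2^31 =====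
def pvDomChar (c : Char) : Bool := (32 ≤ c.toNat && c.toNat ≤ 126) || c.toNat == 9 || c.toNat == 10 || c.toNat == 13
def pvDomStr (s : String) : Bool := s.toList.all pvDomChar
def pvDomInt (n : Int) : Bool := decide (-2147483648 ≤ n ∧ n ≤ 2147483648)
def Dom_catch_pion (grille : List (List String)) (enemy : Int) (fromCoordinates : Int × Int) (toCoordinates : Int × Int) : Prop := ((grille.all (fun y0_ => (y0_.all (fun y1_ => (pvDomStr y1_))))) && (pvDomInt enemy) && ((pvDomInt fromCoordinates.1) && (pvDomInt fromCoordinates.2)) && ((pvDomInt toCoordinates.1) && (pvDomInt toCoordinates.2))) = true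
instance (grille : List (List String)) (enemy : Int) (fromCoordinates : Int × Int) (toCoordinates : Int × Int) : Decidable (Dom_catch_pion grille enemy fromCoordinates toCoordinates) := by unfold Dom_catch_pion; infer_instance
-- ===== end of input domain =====

-- B replaces A's delta tables and 8-direction scan by pure arithmetic: classify the move
-- delta by dx*dx+dy*dy ∈ {4,8}, take the midpoint as the jumped square, and compute the
-- direction code by a sign analysis (objective: alternative, same cost).

-- ===== PORT A =====

-- grille[r][c]; total via defaults — exact wherever the indices are in range (guaranteed by
-- the bounds checks of both programs together with Pre_'s row-length condition)
def pvCell (grille : List (List String)) (r c : Int) : String :=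
  (grille.getD r.toNat []).getD c.toNat ""

-- Data['player'][enemy]['pion']; exact for enemy ∈ {0,1} (Pre_; Python raises KeyError otherwise)
def pvPion (enemy : Int) : String :=
  if enemy = 0 then "\x1b[34m●\x1b[0m" else "\x1b[31m●\x1b[0m"

-- Data['deltaCatch'] zipped with Data['deltas'] (A walks them in lockstep: deltaCatch's
-- elements in order, deltas[i] at the matching index i)
def pvDeltaPairs : List ((Int × Int) × (Int × Int)) :=
  [((2,2),(1,1)), ((-2,-2),(-1,-1)), ((2,-2),(1,-1)), ((-2,2),(-1,1)),
   ((-2,0),(-1,0)), ((2,0),(1,0)), ((0,2),(0,1)), ((0,-2),(0,-1))]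

-- A's for-loop, step for step: bounds check, opponent check, empty-square check, target check
def catchLoop (grille : List (List String)) (opponent : String)
    (fromL fromC toL toC n : Int) :
    List ((Int × Int) × (Int × Int)) → Int → Int
  | [], _ => -1
  | (d, e) :: rest, i =>
    if 0 ≤ fromL + d.1 ∧ fromL + d.1 < n ∧ 0 ≤ fromC + d.2 ∧ fromC + d.2 < n ∧
       0 ≤ fromL + e.1 ∧ fromL + e.1 < n ∧ 0 ≤ fromC + e.2 ∧ fromC + e.2 < n then
      if pvCell grille (fromL + e.1) (fromC + e.2) = opponent then
        if pvCell grille (fromL + d.1) (fromC + d.2) = " " then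
          if fromL + d.1 = toL ∧ fromC + d.2 = toC then i + 1
          else catchLoop grille opponent fromL fromC toL toC n rest (i + 1)
        else catchLoop grille opponent fromL fromC toL toC n rest (i + 1)
      else catchLoop grille opponent fromL fromC toL toC n rest (i + 1)
    else catchLoop grille opponent fromL fromC toL toC n rest (i + 1)

def catch_pion (grille : List (List String)) (enemy : Int) (fromCoordinates : Int × Int) (toCoordinates : Int × Int) : Int :=
  catchLoop grille (pvPion enemy) fromCoordinates.1 fromCoordinates.2
    toCoordinates.1 toCoordinates.2 (grille.length : Int) pvDeltaPairs 0

-- ===== PORT B =====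

def catch_pion_alt (grille : List (List String)) (enemy : Int) (fromCoordinates : Int × Int) (toCoordinates : Int × Int) : Int :=
  let fromL := fromCoordinates.1
  let fromC := fromCoordinates.2
  let toL := toCoordinates.1
  let toC := toCoordinates.2
  -- opponent = _PION[enemy]; exact for enemy ∈ {0,1} (Pre_; Python raises KeyError otherwise)
  let opponent := if enemy = 0 then "\x1b[34m●\x1b[0m" else "\x1b[31m●\x1b[0m"
  let dx := toL - fromL
  let dy := toC - fromC
  if ¬ (dx * dx + dy * dy = 4 ∨ dx * dx + dy * dy = 8) then -1
  else
    let n : Int := grille.length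
    let midL := fromL + PySem.Int.floordiv dx 2
    let midC := fromC + PySem.Int.floordiv dy 2
    if ¬ (0 ≤ toL ∧ toL < n ∧ 0 ≤ toC ∧ toC < n ∧ 0 ≤ midL ∧ midL < n ∧ 0 ≤ midC ∧ midC < n) then -1
    else
      if pvCell grille midL midC ≠ opponent ∨ pvCell grille toL toC ≠ " " then -1
      else if dx ≠ 0 ∧ dy ≠ 0 then
        if dx = dy then (if dx > 0 then 1 else 2) else (if dx > 0 then 3 else 4)
      else if dy = 0 then (if dx < 0 then 5 else 6)
      else if dy > 0 then 7 else 8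

-- ===== PRECONDITION & SPEC =====
-- Pre_ excludes enemy values outside {0,1} (A raises KeyError looking up Data['player'][enemy])
-- and grids where one of the (at most 8) cells the scan probes is missing because its row is
-- shorter than the grid height: there A raises IndexError, except when the opponent check
-- short-circuits before the missing cell is read, an accident of evaluation order (B short-
-- circuits the same way, returning -1 there too).
def Pre_catch_pion (grille : List (List String)) (enemy : Int) (fromCoordinates : Int × Int) (toCoordinates : Int × Int) : Prop :=
  (enemy = 0 ∨ enemy = 1) ∧
  ∀ p ∈ pvDeltaPairs,
    (0 ≤ fromCoordinates.1 + p.1.1 ∧ fromCoordinates.1 + p.1.1 < (grille.length : Int) ∧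
     0 ≤ fromCoordinates.2 + p.1.2 ∧ fromCoordinates.2 + p.1.2 < (grille.length : Int) ∧
     0 ≤ fromCoordinates.1 + p.2.1 ∧ fromCoordinates.1 + p.2.1 < (grille.length : Int) ∧
     0 ≤ fromCoordinates.2 + p.2.2 ∧ fromCoordinates.2 + p.2.2 < (grille.length : Int)) →
    ((fromCoordinates.2 + p.2.2).toNat < (grille.getD (fromCoordinates.1 + p.2.1).toNat []).length ∧
     (fromCoordinates.2 + p.1.2).toNat < (grille.getD (fromCoordinates.1 + p.1.1).toNat []).length)
instance (grille : List (List String)) (enemy : Int) (fromCoordinates : Int × Int) (toCoordinates : Int × Int) : Decidable (Pre_catch_pion grille enemy fromCoordinates toCoordinates) := by unfold Pre_catch_pion; infer_instance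

def pvWitness_catch_pion : List (List String) × Int × (Int × Int) × (Int × Int) :=
  ([[" ", "x"], ["x", " "]], 0, (0, 0), (2, 2))

def Spec_catch_pion (grille : List (List String)) (enemy : Int) (fromCoordinates : Int × Int) (toCoordinates : Int × Int) (out : Int) : Prop := out = catch_pion_alt grille enemy fromCoordinates toCoordinates
instance (grille : List (List String)) (enemy : Int) (fromCoordinates : Int × Int) (toCoordinates : Int × Int) (out : Int) : Decidable (Spec_catch_pion grille enemy fromCoordinates toCoordinates out) := by unfold Spec_catch_pion; infer_instance

-- ===== CLAIM (what is proved, stated in full; the proofs are below) =====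
def Claim_equal_catch_pion : Prop := ∀ (grille : List (List String)) (enemy : Int) (fromCoordinates : Int × Int) (toCoordinates : Int × Int), Dom_catch_pion grille enemy fromCoordinates toCoordinates → Pre_catch_pion grille enemy fromCoordinates toCoordinates → Spec_catch_pion grille enemy fromCoordinates toCoordinates (catch_pion grille enemy fromCoordinates toCoordinates)

-- ===== LEMMAS AND PROOFS =====

-- a direction whose far square is not the target never returns: the loop moves on
theorem catchLoop_skip (g : List (List String)) (o : String) (fromL fromC toL toC n : Int)
    (d e : Int × Int) (rest : List ((Int × Int) × (Int × Int))) (i : Int)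
    (h : ¬ (fromL + d.1 = toL ∧ fromC + d.2 = toC)) :
    catchLoop g o fromL fromC toL toC n ((d, e) :: rest) i =
    catchLoop g o fromL fromC toL toC n rest (i + 1) := by
  simp only [catchLoop]
  split_ifs <;> first | rfl | tauto

-- if no remaining direction reaches the target, the loop returns -1
theorem catchLoop_none (g : List (List String)) (o : String) (fromL fromC toL toC n : Int)
    (L : List ((Int × Int) × (Int × Int))) (i : Int)
    (h : ∀ p ∈ L, ¬ (fromL + p.1.1 = toL ∧ fromC + p.1.2 = toC)) :
    catchLoop g o fromL fromC toL toC n L i = -1 := by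
  induction L generalizing i with
  | nil => rfl
  | cons p rest ih =>
    obtain ⟨d, e⟩ := p
    rw [catchLoop_skip g o fromL fromC toL toC n d e rest i (h (d, e) (by simp))]
    exact ih (i + 1) (fun q hq => h q (List.mem_cons_of_mem _ hq))

-- the head direction reaches the target and no later one does: the loop is one combined check
theorem catchLoop_found (g : List (List String)) (o : String) (fromL fromC toL toC n : Int)
    (d e : Int × Int) (rest : List ((Int × Int) × (Int × Int))) (i : Int)
    (h1 : fromL + d.1 = toL) (h2 : fromC + d.2 = toC)
    (hrest : ∀ p ∈ rest, ¬ (fromL + p.1.1 = toL ∧ fromC + p.1.2 = toC)) :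
    catchLoop g o fromL fromC toL toC n ((d, e) :: rest) i =
    (if 0 ≤ toL ∧ toL < n ∧ 0 ≤ toC ∧ toC < n ∧
        0 ≤ fromL + e.1 ∧ fromL + e.1 < n ∧ 0 ≤ fromC + e.2 ∧ fromC + e.2 < n then
       if pvCell g (fromL + e.1) (fromC + e.2) = o ∧ pvCell g toL toC = " " then i + 1 else -1
     else -1) := by
  subst h1; subst h2
  have hnone := catchLoop_none g o fromL fromC (fromL + d.1) (fromC + d.2) n rest (i + 1) hrest
  simp only [catchLoop, hnone]
  split_ifs <;> simp_all

-- if-shape bridges: B writes its guards negated, A's loop writes them positively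
theorem pvIfNot (c : Prop) [Decidable c] (a b : Int) :
    (if ¬ c then a else b) = if c then b else a := by split_ifs <;> tauto

theorem pvIfOrNeg (A B : Prop) [Decidable A] [Decidable B] (v : Int) :
    (if ¬ A ∨ ¬ B then (-1 : Int) else v) = if A ∧ B then v else -1 := by
  split_ifs <;> tauto

-- the eight integer solutions of d² + e² ∈ {4, 8}
theorem sumsq_cases (d e : Int) (h : d * d + e * e = 4 ∨ d * d + e * e = 8) :
    (d = 2 ∧ e = 2) ∨ (d = -2 ∧ e = -2) ∨ (d = 2 ∧ e = -2) ∨ (d = -2 ∧ e = 2) ∨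
    (d = -2 ∧ e = 0) ∨ (d = 2 ∧ e = 0) ∨ (d = 0 ∧ e = 2) ∨ (d = 0 ∧ e = -2) := by
  have he0 : 0 ≤ e * e := mul_self_nonneg e
  have hd0 : 0 ≤ d * d := mul_self_nonneg d
  have hd8 : d * d ≤ 8 := by omega
  have he8 : e * e ≤ 8 := by omega
  have hd1 : -2 ≤ d := by nlinarith
  have hd2 : d ≤ 2 := by nlinarith
  have he1 : -2 ≤ e := by nlinarith
  have he2 : e ≤ 2 := by nlinarith
  interval_cases d <;> interval_cases e <;> omega

theorem catch_pion_spec : Claim_equal_catch_pion := by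
  intro grille enemy fc tc _hDom _hPre
  obtain ⟨fromL, fromC⟩ := fc
  obtain ⟨toL, toC⟩ := tc
  unfold Spec_catch_pion catch_pion catch_pion_alt
  simp only []
  by_cases k0 : toL - fromL = 2 ∧ toC - fromC = 2
  · rw [pvDeltaPairs]
    rw [catchLoop_found _ _ _ _ _ _ _ _ _ _ _ (by omega) (by omega)
      (by intro p hp; fin_cases hp <;> simp <;> omega)]
    rw [k0.1, k0.2]
    simp only [pvIfNot, pvIfOrNeg, PySem.Int.floordiv,
      show ((-2:Int).fdiv 2) = -1 from by decide, show ((2:Int).fdiv 2) = 1 from by decide,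
      show ((0:Int).fdiv 2) = 0 from by decide]
    norm_num [pvPion]
  by_cases k1 : toL - fromL = -2 ∧ toC - fromC = -2
  · rw [pvDeltaPairs]
    rw [catchLoop_skip _ _ _ _ _ _ _ _ _ _ _ (by omega)]
    rw [catchLoop_found _ _ _ _ _ _ _ _ _ _ _ (by omega) (by omega)
      (by intro p hp; fin_cases hp <;> simp <;> omega)]
    rw [k1.1, k1.2]
    simp only [pvIfNot, pvIfOrNeg, PySem.Int.floordiv,
      show ((-2:Int).fdiv 2) = -1 from by decide, show ((2:Int).fdiv 2) = 1 from by decide,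
      show ((0:Int).fdiv 2) = 0 from by decide]
    norm_num [pvPion]
  by_cases k2 : toL - fromL = 2 ∧ toC - fromC = -2
  · rw [pvDeltaPairs]
    rw [catchLoop_skip _ _ _ _ _ _ _ _ _ _ _ (by omega)]
    rw [catchLoop_skip _ _ _ _ _ _ _ _ _ _ _ (by omega)]
    rw [catchLoop_found _ _ _ _ _ _ _ _ _ _ _ (by omega) (by omega)
      (by intro p hp; fin_cases hp <;> simp <;> omega)]
    rw [k2.1, k2.2]
    simp only [pvIfNot, pvIfOrNeg, PySem.Int.floordiv,
      show ((-2:Int).fdiv 2) = -1 from by decide, show ((2:Int).fdiv 2) = 1 from by decide,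
      show ((0:Int).fdiv 2) = 0 from by decide]
    norm_num [pvPion]
  by_cases k3 : toL - fromL = -2 ∧ toC - fromC = 2
  · rw [pvDeltaPairs]
    rw [catchLoop_skip _ _ _ _ _ _ _ _ _ _ _ (by omega)]
    rw [catchLoop_skip _ _ _ _ _ _ _ _ _ _ _ (by omega)]
    rw [catchLoop_skip _ _ _ _ _ _ _ _ _ _ _ (by omega)]
    rw [catchLoop_found _ _ _ _ _ _ _ _ _ _ _ (by omega) (by omega)
      (by intro p hp; fin_cases hp <;> simp <;> omega)]
    rw [k3.1, k3.2]
    simp only [pvIfNot, pvIfOrNeg, PySem.Int.floordiv,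
      show ((-2:Int).fdiv 2) = -1 from by decide, show ((2:Int).fdiv 2) = 1 from by decide,
      show ((0:Int).fdiv 2) = 0 from by decide]
    norm_num [pvPion]
  by_cases k4 : toL - fromL = -2 ∧ toC - fromC = 0
  · rw [pvDeltaPairs]
    rw [catchLoop_skip _ _ _ _ _ _ _ _ _ _ _ (by omega)]
    rw [catchLoop_skip _ _ _ _ _ _ _ _ _ _ _ (by omega)]
    rw [catchLoop_skip _ _ _ _ _ _ _ _ _ _ _ (by omega)]
    rw [catchLoop_skip _ _ _ _ _ _ _ _ _ _ _ (by omega)]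
    rw [catchLoop_found _ _ _ _ _ _ _ _ _ _ _ (by omega) (by omega)
      (by intro p hp; fin_cases hp <;> simp <;> omega)]
    rw [k4.1, k4.2]
    simp only [pvIfNot, pvIfOrNeg, PySem.Int.floordiv,
      show ((-2:Int).fdiv 2) = -1 from by decide, show ((2:Int).fdiv 2) = 1 from by decide,
      show ((0:Int).fdiv 2) = 0 from by decide]
    norm_num [pvPion]
  by_cases k5 : toL - fromL = 2 ∧ toC - fromC = 0
  · rw [pvDeltaPairs]
    rw [catchLoop_skip _ _ _ _ _ _ _ _ _ _ _ (by omega)]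
    rw [catchLoop_skip _ _ _ _ _ _ _ _ _ _ _ (by omega)]
    rw [catchLoop_skip _ _ _ _ _ _ _ _ _ _ _ (by omega)]
    rw [catchLoop_skip _ _ _ _ _ _ _ _ _ _ _ (by omega)]
    rw [catchLoop_skip _ _ _ _ _ _ _ _ _ _ _ (by omega)]
    rw [catchLoop_found _ _ _ _ _ _ _ _ _ _ _ (by omega) (by omega)
      (by intro p hp; fin_cases hp <;> simp <;> omega)]
    rw [k5.1, k5.2]
    simp only [pvIfNot, pvIfOrNeg, PySem.Int.floordiv,
      show ((-2:Int).fdiv 2) = -1 from by decide, show ((2:Int).fdiv 2) = 1 from by decide,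
      show ((0:Int).fdiv 2) = 0 from by decide]
    norm_num [pvPion]
  by_cases k6 : toL - fromL = 0 ∧ toC - fromC = 2
  · rw [pvDeltaPairs]
    rw [catchLoop_skip _ _ _ _ _ _ _ _ _ _ _ (by omega)]
    rw [catchLoop_skip _ _ _ _ _ _ _ _ _ _ _ (by omega)]
    rw [catchLoop_skip _ _ _ _ _ _ _ _ _ _ _ (by omega)]
    rw [catchLoop_skip _ _ _ _ _ _ _ _ _ _ _ (by omega)]
    rw [catchLoop_skip _ _ _ _ _ _ _ _ _ _ _ (by omega)]
    rw [catchLoop_skip _ _ _ _ _ _ _ _ _ _ _ (by omega)]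
    rw [catchLoop_found _ _ _ _ _ _ _ _ _ _ _ (by omega) (by omega)
      (by intro p hp; fin_cases hp <;> simp <;> omega)]
    rw [k6.1, k6.2]
    simp only [pvIfNot, pvIfOrNeg, PySem.Int.floordiv,
      show ((-2:Int).fdiv 2) = -1 from by decide, show ((2:Int).fdiv 2) = 1 from by decide,
      show ((0:Int).fdiv 2) = 0 from by decide]
    norm_num [pvPion]
  by_cases k7 : toL - fromL = 0 ∧ toC - fromC = -2
  · rw [pvDeltaPairs]
    rw [catchLoop_skip _ _ _ _ _ _ _ _ _ _ _ (by omega)]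
    rw [catchLoop_skip _ _ _ _ _ _ _ _ _ _ _ (by omega)]
    rw [catchLoop_skip _ _ _ _ _ _ _ _ _ _ _ (by omega)]
    rw [catchLoop_skip _ _ _ _ _ _ _ _ _ _ _ (by omega)]
    rw [catchLoop_skip _ _ _ _ _ _ _ _ _ _ _ (by omega)]
    rw [catchLoop_skip _ _ _ _ _ _ _ _ _ _ _ (by omega)]
    rw [catchLoop_skip _ _ _ _ _ _ _ _ _ _ _ (by omega)]
    rw [catchLoop_found _ _ _ _ _ _ _ _ _ _ _ (by omega) (by omega)
      (by intro p hp; fin_cases hp <;> simp <;> omega)]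
    rw [k7.1, k7.2]
    simp only [pvIfNot, pvIfOrNeg, PySem.Int.floordiv,
      show ((-2:Int).fdiv 2) = -1 from by decide, show ((2:Int).fdiv 2) = 1 from by decide,
      show ((0:Int).fdiv 2) = 0 from by decide]
    norm_num [pvPion]
  · have hsum : ¬ ((toL - fromL) * (toL - fromL) + (toC - fromC) * (toC - fromC) = 4 ∨
        (toL - fromL) * (toL - fromL) + (toC - fromC) * (toC - fromC) = 8) := by
      intro h
      rcases sumsq_cases _ _ h with h' | h' | h' | h' | h' | h' | h' | h' <;> tauto
    rw [if_pos hsum]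
    rw [pvDeltaPairs, catchLoop_none _ _ _ _ _ _ _ _ _
      (by intro p hp; fin_cases hp <;> simp <;> omega)]

-- ===== VERDICT (by name: the statement is the Claim_ definition above) =====
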